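-- pv_equiv track=rewrite | github.com/jamesdwilson/nomadcast | nomadcastd/reticulum_import.py | _extract_interfaces_block
-- ===== SOURCE A (Python) =====
-- def _extract_interfaces_block(source_text: str) -> list[str]:
--     lines = source_text.splitlines()
--     start_index = None
--     for index, line in enumerate(lines):
--         if line.strip().lower() == "[interfaces]":
--             start_index = index
--             break
--     if start_index is None:
--         return []
--     block = [lines[start_index]]
--     for line in lines[start_index + 1 :]:
--         stripped = line.strip()
--         if stripped.startswith("[") and stripped.endswith("]"):
--             break
--         block.append(line)
--     while block and not block[-1].strip():
--         block.pop()
--     return block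
-- ===== SOURCE B (Python) =====
-- def _split_sections(lines):
--     sections = []
--     for line in lines:
--         stripped = line.strip()
--         if stripped.startswith("[") and stripped.endswith("]"):
--             sections.append((stripped.lower(), [line]))
--         elif sections:
--             sections[-1][1].append(line)
--     return sections
--
-- def _extract_interfaces_block(source_text: str) -> list[str]:
--     for key, block in _split_sections(source_text.splitlines()):
--         if key == "[interfaces]":
--             while block and not block[-1].strip():
--                 block.pop()
--             return block
--     return []
-- ===== Notes on version B (the rewrite author's own statement) =====
-- stated objective: alternative
-- what changed: B parses the whole text in one grouping pass into an ordered list of (lowercased-header-key, lines) sections and then selects the first section whose key is the interfaces header, instead of A's scan-for-start-line followed by a second walk that stops at the next header.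
import Mathlib
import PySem

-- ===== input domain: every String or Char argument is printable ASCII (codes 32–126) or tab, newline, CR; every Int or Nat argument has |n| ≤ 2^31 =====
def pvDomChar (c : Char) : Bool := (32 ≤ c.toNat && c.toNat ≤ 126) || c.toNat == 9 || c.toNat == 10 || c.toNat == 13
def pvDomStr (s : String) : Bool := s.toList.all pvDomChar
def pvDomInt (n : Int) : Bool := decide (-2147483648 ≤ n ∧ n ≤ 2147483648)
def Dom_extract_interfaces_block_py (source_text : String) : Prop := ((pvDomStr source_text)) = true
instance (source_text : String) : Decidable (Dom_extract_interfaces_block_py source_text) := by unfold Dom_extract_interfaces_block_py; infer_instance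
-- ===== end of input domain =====

-- B builds the section table once and selects from it, instead of A's start-scan + rescan; same return value.

-- shared helper: the trailing-blank-trimming while-pop loop, identical in both Pythons
def pvTrim (block : List String) : List String :=
  match h : block.getLast? with
  | none => block
  | some last => if PySem.Str.strip last == "" then pvTrim block.dropLast else block
termination_by block.length
decreasing_by
  have hne : block ≠ [] := by intro he; subst he; simp at h
  have := List.length_pos_of_ne_nil hne
  simp [List.length_dropLast]; omega

-- ===== PORT A =====
-- first loop of A: find the index of the first line whose strip().lower() == "[interfaces]"
def pvAFindStart (i : Nat) : List String → Option Nat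
  | [] => none
  | line :: rest =>
    if PySem.Str.lower (PySem.Str.strip line) == "[interfaces]" then some i
    else pvAFindStart (i + 1) rest

-- second loop of A: collect lines until a bracketed header line (the break)
def pvABody : List String → List String
  | [] => []
  | line :: rest =>
    let stripped := PySem.Str.strip line
    if PySem.Str.startswith stripped "[" && PySem.Str.endswith stripped "]" then []
    else line :: pvABody rest

def extract_interfaces_block_py (source_text : String) : List String :=
  let lines := PySem.Str.splitlines source_text
  match pvAFindStart 0 lines with
  | none => []
  | some si =>
      pvTrim ([(PySem.List.pyGet? lines (si : Int)).getD ""]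
              ++ pvABody (PySem.List.slice lines (some ((si : Int) + 1)) none))

-- ===== PORT B =====
-- sections[-1][1].append(line)
def pvAppendLast (line : String) : List (String × List String) → List (String × List String)
  | [] => []
  | [x] => [(x.1, x.2 ++ [line])]
  | x :: y :: rest => x :: pvAppendLast line (y :: rest)

-- B's grouping pass
def pvSplitSections (sections : List (String × List String)) : List String → List (String × List String)
  | [] => sections
  | line :: rest =>
    let stripped := PySem.Str.strip line
    if PySem.Str.startswith stripped "[" && PySem.Str.endswith stripped "]" then
      pvSplitSections (sections ++ [(PySem.Str.lower stripped, [line])]) rest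
    else if sections.isEmpty then pvSplitSections sections rest
    else pvSplitSections (pvAppendLast line sections) rest

def extract_interfaces_block_py_alt (source_text : String) : List String :=
  match (pvSplitSections [] (PySem.Str.splitlines source_text)).find?
          (fun kb => kb.1 == "[interfaces]") with
  | none => []
  | some kb => pvTrim kb.2

-- ===== PRECONDITION & SPEC =====
def Spec_extract_interfaces_block_py (source_text : String) (out : List String) : Prop := out = extract_interfaces_block_py_alt source_text
instance (source_text : String) (out : List String) : Decidable (Spec_extract_interfaces_block_py source_text out) := by unfold Spec_extract_interfaces_block_py; infer_instance

-- ===== CLAIM (what is proved, stated in full; the proofs are below) =====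
def Claim_equal_extract_interfaces_block_py : Prop := ∀ (source_text : String), Dom_extract_interfaces_block_py source_text → Spec_extract_interfaces_block_py source_text (extract_interfaces_block_py source_text)

-- ===== LEMMAS AND PROOFS =====

def pvHdr (l : String) : Bool :=
  PySem.Str.startswith (PySem.Str.strip l) "[" && PySem.Str.endswith (PySem.Str.strip l) "]"

def pvStart (l : String) : Bool :=
  PySem.Str.lower (PySem.Str.strip l) == "[interfaces]"

-- clean recursive description of B's section table
def pvSecs : List String → List (String × List String)
  | [] => []
  | l :: rest =>
    if pvHdr l then
      (PySem.Str.lower (PySem.Str.strip l), l :: rest.takeWhile (fun x => !pvHdr x))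
        :: pvSecs (rest.dropWhile (fun x => !pvHdr x))
    else pvSecs rest
termination_by lines => lines.length
decreasing_by
  · have := List.length_dropWhile_le (fun x => !pvHdr x) rest; simp; omega
  · simp

def pvACore (lines : List String) : List String :=
  match pvAFindStart 0 lines with
  | none => []
  | some si =>
      pvTrim ([(PySem.List.pyGet? lines (si : Int)).getD ""]
              ++ pvABody (PySem.List.slice lines (some ((si : Int) + 1)) none))

def pvBCore (lines : List String) : List String :=
  match (pvSecs lines).find? (fun kb => kb.1 == "[interfaces]") with
  | none => []
  | some kb => pvTrim kb.2

lemma pv_lowerChar_fix (c t : Char) (ht : ¬ (97 ≤ t.toNat ∧ t.toNat ≤ 122))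
    (h : PySem.Chars.lowerChar c = t) : c = t := by
  unfold PySem.Chars.lowerChar PySem.Chars.isupper at h
  split at h
  · next hu =>
    simp only [Bool.and_eq_true, decide_eq_true_eq] at hu
    have hA : c.toNat ≥ 65 := by
      have := Fin.mk_le_mk.mp hu.1; simpa using this
    have hZ : c.toNat ≤ 90 := by
      have := Fin.mk_le_mk.mp hu.2; simpa using this
    have hv : (c.toNat + 32).isValidChar := by constructor; omega
    have := congrArg Char.toNat h
    rw [Char.toNat_ofNat (c.toNat + 32)] at this
    simp [hv] at this
    omega
  · exact h

lemma pv_start_hdr (l : String) (h : pvStart l = true) : pvHdr l = true := by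
  unfold pvStart at h
  unfold pvHdr
  have he : PySem.Str.lower (PySem.Str.strip l) = "[interfaces]" := by
    simpa using h
  have hl : PySem.Chars.lower (PySem.Str.strip l).toList = "[interfaces]".toList := by
    rw [← PySem.Str.toList_lower, he]
  unfold PySem.Chars.lower at hl
  cases hcs : (PySem.Str.strip l).toList with
  | nil => rw [hcs] at hl; simp at hl
  | cons c0 tl =>
    rw [hcs] at hl
    have hshow : "[interfaces]".toList = '[' :: "interfaces]".toList := by decide
    rw [hshow] at hl
    simp only [List.map_cons, List.cons.injEq] at hl
    have hc0 : c0 = '[' := pv_lowerChar_fix c0 '[' (by decide) hl.1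
    -- last char
    have hlast : ((c0 :: tl).map PySem.Chars.lowerChar).getLast? = some ']' := by
      rw [List.map_cons, hl.1, hl.2, ← hshow]; decide
    rw [List.getLast?_map] at hlast
    obtain ⟨cl, hcl, hcl2⟩ := Option.map_eq_some_iff.mp hlast
    have hcl' : cl = ']' := pv_lowerChar_fix cl ']' (by decide) hcl2
    obtain ⟨ys, hys⟩ := List.getLast?_eq_some_iff.mp hcl
    rw [Bool.and_eq_true]
    constructor
    · rw [PySem.Str.startswith_eq, hcs]
      rw [PySem.Chars.startswith_iff]
      refine ⟨tl, ?_⟩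
      have hb : "[".toList = ['['] := by decide
      rw [hc0, hb]
      rfl
    · rw [PySem.Str.endswith_eq, hcs]
      rw [PySem.Chars.endswith_iff]
      refine ⟨ys, ?_⟩
      have hb : "]".toList = [']'] := by decide
      rw [hb, hys, hcl']

lemma pvABody_eq (rest : List String) : pvABody rest = rest.takeWhile (fun x => !pvHdr x) := by
  induction rest with
  | nil => rfl
  | cons l t ih =>
    have hc : (PySem.Str.startswith (PySem.Str.strip l) "[" &&
        PySem.Str.endswith (PySem.Str.strip l) "]") = pvHdr l := rfl
    simp only [pvABody, List.takeWhile_cons, hc]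
    cases h : pvHdr l
    · simp [ih]
    · simp

lemma pvAppendLast_append (line : String) (acc : List (String × List String))
    (k : String) (b : List String) :
    pvAppendLast line (acc ++ [(k, b)]) = acc ++ [(k, b ++ [line])] := by
  induction acc with
  | nil => rfl
  | cons x acc' ih =>
    cases hacc : acc' ++ [(k, b)] with
    | nil => simp at hacc
    | cons w r =>
      show pvAppendLast line (x :: (acc' ++ [(k, b)])) = _
      rw [hacc]
      show x :: pvAppendLast line (w :: r) = _
      rw [← hacc, ih]
      simp

lemma pvSplit_eq (lines : List String) : ∀ (acc : List (String × List String))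
    (k : String) (b : List String),
    pvSplitSections (acc ++ [(k, b)]) lines
      = (acc ++ [(k, b ++ lines.takeWhile (fun x => !pvHdr x))])
          ++ pvSecs (lines.dropWhile (fun x => !pvHdr x)) := by
  induction lines with
  | nil => intro acc k b; simp [pvSplitSections, pvSecs]
  | cons l rest ih =>
    intro acc k b
    have hc : (PySem.Str.startswith (PySem.Str.strip l) "[" &&
        PySem.Str.endswith (PySem.Str.strip l) "]") = pvHdr l := rfl
    simp only [pvSplitSections, hc, List.takeWhile_cons, List.dropWhile_cons]
    cases h : pvHdr l
    · simp only [Bool.false_eq_true, if_false, Bool.not_false, if_true]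
      have hne : (acc ++ [(k, b)]).isEmpty = false := by simp
      rw [hne]
      simp only [Bool.false_eq_true, if_false]
      rw [pvAppendLast_append, ih acc k (b ++ [l])]
      simp
    · simp only [if_true, Bool.not_true, Bool.false_eq_true, if_false]
      rw [ih (acc ++ [(k, b)]) (PySem.Str.lower (PySem.Str.strip l)) [l]]
      simp only [pvSecs, h, if_true]
      simp

lemma pvSplit_nil (lines : List String) : pvSplitSections [] lines = pvSecs lines := by
  induction lines with
  | nil => simp [pvSplitSections, pvSecs]
  | cons l rest ih =>
    have hc : (PySem.Str.startswith (PySem.Str.strip l) "[" &&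
        PySem.Str.endswith (PySem.Str.strip l) "]") = pvHdr l := rfl
    simp only [pvSplitSections, hc]
    cases h : pvHdr l
    · simp only [Bool.false_eq_true, if_false, List.isEmpty_nil, if_true, pvSecs, h]
      exact ih
    · simp only [if_true]
      have := pvSplit_eq rest ([] : List (String × List String))
        (PySem.Str.lower (PySem.Str.strip l)) [l]
      simp only [List.nil_append] at this
      rw [show ([] : List (String × List String)) ++ [(PySem.Str.lower (PySem.Str.strip l), [l])]
            = [(PySem.Str.lower (PySem.Str.strip l), [l])] from rfl, this]
      simp [pvSecs, h]

lemma pvFind_shift (rest : List String) : ∀ i : Nat,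
    pvAFindStart i rest = Option.map (· + i) (pvAFindStart 0 rest) := by
  induction rest with
  | nil => intro i; rfl
  | cons l t ih =>
    intro i
    by_cases h : pvStart l
    · unfold pvStart at h; simp [pvAFindStart, h]
    · unfold pvStart at h
      simp only [Bool.not_eq_true] at h
      simp only [pvAFindStart, h, Bool.false_eq_true, if_false]
      rw [ih (i + 1), ih 1, Option.map_map]
      have hfun : ((· + i) ∘ (· + 1) : Nat → Nat) = (· + (i + 1)) := by
        funext x; simp; omega
      rw [hfun]

lemma pvACore_skip (l : String) (rest : List String) (h : pvStart l = false) :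
    pvACore (l :: rest) = pvACore rest := by
  unfold pvStart at h
  unfold pvACore
  have hfind : pvAFindStart 0 (l :: rest) = Option.map (· + 1) (pvAFindStart 0 rest) := by
    simp only [pvAFindStart, h, Bool.false_eq_true, if_false]
    exact pvFind_shift rest 1
  cases hf : pvAFindStart 0 rest with
  | none => rw [hfind, hf]; rfl
  | some si =>
    rw [hfind, hf]
    simp only [Option.map_some]
    have hget : (PySem.List.pyGet? (l :: rest) ((si + 1 : Nat) : Int)).getD ""
        = (PySem.List.pyGet? rest ((si : Nat) : Int)).getD "" := by
      rw [PySem.List.pyGet?_natCast, PySem.List.pyGet?_natCast]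
      simp
    have hslice : PySem.List.slice (l :: rest) (some (((si + 1 : Nat) : Int) + 1)) none
        = PySem.List.slice rest (some (((si : Nat) : Int) + 1)) none := by
      have e1 : (((si + 1 : Nat) : Int) + 1) = ((si + 2 : Nat) : Int) := by push_cast; ring
      have e2 : (((si : Nat) : Int) + 1) = ((si + 1 : Nat) : Int) := by push_cast; ring
      rw [e1, e2, PySem.List.slice_from_natCast, PySem.List.slice_from_natCast]
      rfl
    rw [hget, hslice]

lemma pvACore_dropWhile (rest : List String) :
    pvACore rest = pvACore (rest.dropWhile (fun x => !pvHdr x)) := by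
  induction rest with
  | nil => rfl
  | cons l t ih =>
    by_cases h : pvHdr l
    · simp [List.dropWhile_cons, h]
    · have hs : pvStart l = false := by
        cases hs : pvStart l
        · rfl
        · exact absurd (pv_start_hdr l hs) (by simp [h])
      rw [List.dropWhile_cons]
      simp only [h, Bool.not_false, if_true]
      rw [pvACore_skip l t hs]
      exact ih

lemma pvMain : ∀ (n : Nat) (lines : List String), lines.length ≤ n →
    pvACore lines = pvBCore lines := by
  intro n
  induction n with
  | zero =>
    intro lines h
    have : lines = [] := List.eq_nil_of_length_eq_zero (Nat.le_zero.mp h)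
    subst this
    have hA : pvACore [] = [] := by unfold pvACore; rfl
    have hB : pvBCore [] = [] := by unfold pvBCore; rw [pvSecs]; rfl
    rw [hA, hB]
  | succ n ih =>
    intro lines h
    cases lines with
    | nil =>
      have hA : pvACore [] = [] := by unfold pvACore; rfl
      have hB : pvBCore [] = [] := by unfold pvBCore; rw [pvSecs]; rfl
      rw [hA, hB]
    | cons l rest =>
      by_cases hh : pvHdr l
      · by_cases hs : pvStart l
        · -- the head line starts the [interfaces] section
          have hs' := hs; unfold pvStart at hs'
          have hget : (PySem.List.pyGet? (l :: rest) (((0 : Nat) : Int))).getD "" = l := by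
            rw [PySem.List.pyGet?_natCast]; rfl
          have hslice : PySem.List.slice (l :: rest) (some (((0 : Nat) : Int) + 1)) none
              = rest := by
            have e : (((0 : Nat) : Int) + 1) = ((1 : Nat) : Int) := by norm_num
            rw [e, PySem.List.slice_from_natCast]
            rfl
          have hA : pvACore (l :: rest)
              = pvTrim (l :: rest.takeWhile (fun x => !pvHdr x)) := by
            unfold pvACore
            rw [show pvAFindStart 0 (l :: rest) = some 0 from by
              simp [pvAFindStart, hs']]
            show pvTrim ([(PySem.List.pyGet? (l :: rest) (((0 : Nat) : Int))).getD ""]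
                ++ pvABody (PySem.List.slice (l :: rest) (some (((0 : Nat) : Int) + 1)) none)) = _
            rw [hget, hslice, pvABody_eq]
            rfl
          have hB : pvBCore (l :: rest)
              = pvTrim (l :: rest.takeWhile (fun x => !pvHdr x)) := by
            unfold pvBCore
            rw [pvSecs]
            simp only [hh, if_true]
            rw [List.find?_cons_of_pos (by simpa using hs')]
          rw [hA, hB]
        · -- a header line that is not [interfaces]
          have hs' : pvStart l = false := by simpa using hs
          have hlen : (rest.dropWhile (fun x => !pvHdr x)).length ≤ n := by
            have := List.length_dropWhile_le (fun x => !pvHdr x) rest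
            simp at h; omega
          have hkey : ((PySem.Str.lower (PySem.Str.strip l),
              l :: rest.takeWhile (fun x => !pvHdr x)).1 == "[interfaces]") = false := by
            simpa [pvStart] using hs'
          have hB : pvBCore (l :: rest) = pvBCore (rest.dropWhile (fun x => !pvHdr x)) := by
            unfold pvBCore
            rw [pvSecs]
            simp only [hh, if_true]
            rw [List.find?_cons_of_neg (by simp [hkey])]
          rw [pvACore_skip l rest hs', pvACore_dropWhile rest, ih _ hlen, hB]
      · -- a plain body line
        have hs : pvStart l = false := by
          cases hs : pvStart l
          · rfl
          · exact absurd (pv_start_hdr l hs) (by simp [hh])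
        have hlen : rest.length ≤ n := by simp at h; omega
        have hB : pvBCore (l :: rest) = pvBCore rest := by
          unfold pvBCore
          rw [pvSecs]
          simp only [hh, Bool.false_eq_true, if_false]
        rw [pvACore_skip l rest hs, ih rest hlen, hB]

-- ===== VERDICT (by name: the statement is the Claim_ definition above) =====
theorem extract_interfaces_block_py_spec : Claim_equal_extract_interfaces_block_py := by
  intro source_text _
  unfold Spec_extract_interfaces_block_py
  have hA : extract_interfaces_block_py source_text
      = pvACore (PySem.Str.splitlines source_text) := rfl
  have hB : extract_interfaces_block_py_alt source_text
      = pvBCore (PySem.Str.splitlines source_text) := by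
    unfold extract_interfaces_block_py_alt pvBCore
    rw [pvSplit_nil]
  rw [hA, hB]
  exact pvMain (PySem.Str.splitlines source_text).length _ le_rfl
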